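-- pv_equiv track=rewrite | github.com/Fostonger/graph-rag | src/graphrag/db/queries.py | _collect_focus_nodes
-- ===== SOURCE A (Python) =====
-- from collections import defaultdict, deque
-- from typing import Any, Dict, Iterable, List, Optional, Set, Tuple
--
-- def _collect_focus_nodes(
--     start_id: str,
--     stop_id: Optional[str],
--     creates_by_child: Dict[str, List[Dict[str, Any]]],
-- ) -> set[str]:
--     focus: set[str] = set()
--     queue: deque[str] = deque([start_id])
--     while queue:
--         node_id = queue.popleft()
--         if node_id in focus:
--             continue
--         focus.add(node_id)
--         for rel in creates_by_child.get(node_id, []):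
--             parent_id = rel["source_stable_id"]
--             if parent_id and parent_id not in focus:
--                 focus.add(parent_id)
--                 if not stop_id or parent_id != stop_id:
--                     queue.append(parent_id)
--     return focus
-- ===== SOURCE B (Python) =====
-- def _collect_focus_nodes(start_id, stop_id, creates_by_child):
--     # The BFS in the original marks discovered parents as visited before
--     # enqueueing them, so dequeued parents are always skipped: only
--     # start_id's own relations are ever explored.  A single pass over
--     # them computes the same set directly (stop_id cannot affect it).
--     focus = {start_id}
--     for rel in creates_by_child.get(start_id, []):
--         parent_id = rel["source_stable_id"]
--         if parent_id:
--             focus.add(parent_id)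
--     return focus
-- ===== Notes on version B (the rewrite author's own statement) =====
-- stated objective: simpler
-- what changed: Replaced the worklist BFS (deque + visited-set gating + stop_id enqueue gate) with a single direct pass over start_id's own relation list, which provably yields the identical set because the original marks parents visited before enqueueing them and so never explores past start_id.
import Mathlib
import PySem

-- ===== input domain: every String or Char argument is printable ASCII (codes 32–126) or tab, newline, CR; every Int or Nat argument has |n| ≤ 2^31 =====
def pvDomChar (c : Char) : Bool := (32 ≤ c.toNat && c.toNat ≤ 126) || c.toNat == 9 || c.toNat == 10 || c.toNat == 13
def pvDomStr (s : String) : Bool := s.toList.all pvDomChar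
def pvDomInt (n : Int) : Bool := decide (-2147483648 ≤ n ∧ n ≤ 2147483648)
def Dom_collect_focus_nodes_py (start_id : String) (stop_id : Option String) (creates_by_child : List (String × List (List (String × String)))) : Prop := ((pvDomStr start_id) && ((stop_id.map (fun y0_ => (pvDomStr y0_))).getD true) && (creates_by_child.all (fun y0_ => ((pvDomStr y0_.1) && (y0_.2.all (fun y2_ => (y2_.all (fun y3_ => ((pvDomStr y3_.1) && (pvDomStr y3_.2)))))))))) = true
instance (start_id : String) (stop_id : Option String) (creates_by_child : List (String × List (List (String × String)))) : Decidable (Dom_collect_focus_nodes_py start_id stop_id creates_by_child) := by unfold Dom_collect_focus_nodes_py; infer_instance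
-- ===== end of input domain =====

-- B replaces the worklist BFS by one direct pass over start_id's relation list
-- (the original never explores past start_id, so the result is the same set); objective: simpler.

-- ===== PORT A =====
-- the body of the inner 'for rel in creates_by_child.get(node_id, [])' loop; state = (focus, queue)
def pvAStep (stop_id : Option String) (st : PySem.Set String × List String)
    (rel : List (String × String)) : PySem.Set String × List String :=
  -- rel["source_stable_id"]: KeyError (get? = none) is excluded by Pre_; getD "" is a dummy there
  let parent_id := ((PySem.Dict.ofList rel).get? "source_stable_id").getD ""
  if parent_id ≠ "" ∧ parent_id ∉ st.1 then
    let focus' := PySem.Set.add st.1 parent_id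
    -- 'if not stop_id or parent_id != stop_id' (None and "" are falsy)
    -- Option.elim: None is falsy; so is the empty string
    if (stop_id.elim true (fun s => s == "" || parent_id != s)) then
      (focus', st.2 ++ [parent_id])
    else (focus', st.2)
  else st

-- the 'while queue' loop; fuel only makes the recursion structural: one unit per dequeue,
-- and 1 + (total number of relation records) dequeues can ever happen (each enqueue after
-- the initial one is paired with a fresh focus insertion triggered by one relation record)
def pvALoop (stop_id : Option String) (cbc : PySem.Dict String (List (List (String × String)))) :
    Nat → List String → PySem.Set String → PySem.Set String
  | 0, _, focus => focus
  | _ + 1, [], focus => focus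
  | fuel + 1, node_id :: queue, focus =>
    if node_id ∈ focus then pvALoop stop_id cbc fuel queue focus
    else
      let focus' := PySem.Set.add focus node_id
      let st := (cbc.getD node_id []).foldl (pvAStep stop_id) (focus', queue)
      pvALoop stop_id cbc fuel st.2 st.1

def collect_focus_nodes_py (start_id : String) (stop_id : Option String)
    (creates_by_child : List (String × List (List (String × String)))) : List String :=
  pvALoop stop_id (PySem.Dict.ofList creates_by_child)
    (creates_by_child.foldl (fun n kv => n + kv.2.length) 0 + 1)
    [start_id] PySem.Set.empty

-- ===== PORT B =====
-- body of B's single 'for rel in creates_by_child.get(start_id, [])' loop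
def pvBStep (focus : PySem.Set String) (rel : List (String × String)) : PySem.Set String :=
  let parent_id := ((PySem.Dict.ofList rel).get? "source_stable_id").getD ""
  if parent_id ≠ "" then PySem.Set.add focus parent_id else focus

def collect_focus_nodes_py_alt (start_id : String) (stop_id : Option String)
    (creates_by_child : List (String × List (List (String × String)))) : List String :=
  ((PySem.Dict.ofList creates_by_child).getD start_id []).foldl pvBStep
    (PySem.Set.ofList [start_id])

-- ===== PRECONDITION & SPEC =====
-- Pre_ excludes exactly the inputs where the Python raises (KeyError): some relation record of
-- start_id lacks the key "source_stable_id" (both A and B raise there, at the same record).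
def Pre_collect_focus_nodes_py (start_id : String) (stop_id : Option String) (creates_by_child : List (String × List (List (String × String)))) : Prop :=
  (((PySem.Dict.ofList creates_by_child).getD start_id []).all
    (fun rel => ((PySem.Dict.ofList rel).get? "source_stable_id").isSome)) = true
instance (start_id : String) (stop_id : Option String) (creates_by_child : List (String × List (List (String × String)))) : Decidable (Pre_collect_focus_nodes_py start_id stop_id creates_by_child) := by unfold Pre_collect_focus_nodes_py; infer_instance

def pvWitness_collect_focus_nodes_py : String × Option String × (List (String × List (List (String × String)))) :=
  ("a", some "b", [("a", [[("source_stable_id", "b")], [("source_stable_id", "c")]]), ("b", [[("source_stable_id", "c")]])])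

def Spec_collect_focus_nodes_py (start_id : String) (stop_id : Option String) (creates_by_child : List (String × List (List (String × String)))) (out : List String) : Prop := out = collect_focus_nodes_py_alt start_id stop_id creates_by_child
instance (start_id : String) (stop_id : Option String) (creates_by_child : List (String × List (List (String × String)))) (out : List String) : Decidable (Spec_collect_focus_nodes_py start_id stop_id creates_by_child out) := by unfold Spec_collect_focus_nodes_py; infer_instance

-- ===== CLAIM (what is proved, stated in full; the proofs are below) =====
def Claim_equal_collect_focus_nodes_py : Prop := ∀ (start_id : String) (stop_id : Option String) (creates_by_child : List (String × List (List (String × String)))), Dom_collect_focus_nodes_py start_id stop_id creates_by_child → Pre_collect_focus_nodes_py start_id stop_id creates_by_child → Spec_collect_focus_nodes_py start_id stop_id creates_by_child (collect_focus_nodes_py start_id stop_id creates_by_child)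

-- ===== LEMMAS AND PROOFS =====

theorem pvIf_pair {c : Prop} [Decidable c] (a : PySem.Set String) (x y : List String) :
    (if c then (a, x) else (a, y)).1 = a ∧
    ((if c then (a, x) else (a, y)).2 = x ∨ (if c then (a, x) else (a, y)).2 = y) := by
  split <;> simp

-- A's inner loop: its focus component equals B's fold, its queue stays inside the focus,
-- and the queue grows by at most one element per relation record.
theorem pvAStep_fold_inv (stop_id : Option String) (rels : List (List (String × String)))
    (st : PySem.Set String × List String) (hq : ∀ x ∈ st.2, x ∈ st.1) :
    (rels.foldl (pvAStep stop_id) st).1 = rels.foldl pvBStep st.1 ∧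
    (∀ x ∈ (rels.foldl (pvAStep stop_id) st).2, x ∈ (rels.foldl (pvAStep stop_id) st).1) ∧
    (rels.foldl (pvAStep stop_id) st).2.length ≤ st.2.length + rels.length := by
  induction rels generalizing st with
  | nil => exact ⟨rfl, hq, by simp⟩
  | cons rel rels ih =>
    simp only [List.foldl_cons]
    have hstep :
        (pvAStep stop_id st rel).1 = pvBStep st.1 rel ∧
        (∀ x ∈ (pvAStep stop_id st rel).2, x ∈ (pvAStep stop_id st rel).1) ∧
        (pvAStep stop_id st rel).2.length ≤ st.2.length + 1 := by
      simp only [pvAStep, pvBStep]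
      set p := ((PySem.Dict.ofList rel).get? "source_stable_id").getD "" with hp
      by_cases h1 : p = ""
      · rw [if_neg (by simp [h1]), if_neg (by simp [h1])]
        exact ⟨rfl, hq, by omega⟩
      · by_cases h2 : p ∈ st.1
        · rw [if_neg (by tauto), if_pos h1, PySem.Set.add_of_mem h2]
          exact ⟨rfl, hq, by omega⟩
        · rw [if_pos (⟨h1, h2⟩ : p ≠ "" ∧ p ∉ st.1), if_pos h1]
          obtain ⟨e1, e2⟩ := pvIf_pair
            (c := ((stop_id.elim true (fun s => s == "" || p != s)) = true))
            (st.1.add p) (st.2 ++ [p]) st.2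
          refine ⟨e1, ?_, ?_⟩
          · rw [e1]
            intro x hx
            rcases e2 with e2 | e2 <;> rw [e2] at hx
            · rcases List.mem_append.mp hx with hx | hx
              · exact (PySem.Set.mem_add _ _ _).mpr (Or.inl (hq x hx))
              · simp only [List.mem_singleton] at hx
                exact (PySem.Set.mem_add _ _ _).mpr (Or.inr hx)
            · exact (PySem.Set.mem_add _ _ _).mpr (Or.inl (hq x hx))
          · rcases e2 with e2 | e2 <;> rw [e2] <;> simp
    obtain ⟨h1, h2, h3⟩ := hstep
    obtain ⟨g1, g2, g3⟩ := ih (pvAStep stop_id st rel) h2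
    exact ⟨by rw [g1, h1], g2, by simp only [List.length_cons]; omega⟩

-- draining: once every queued id is already in focus, the loop only dequeues
theorem pvALoop_drain (stop_id : Option String) (cbc : PySem.Dict String (List (List (String × String))))
    (queue : List String) : ∀ (fuel : Nat) (focus : PySem.Set String),
    (∀ x ∈ queue, x ∈ focus) → queue.length ≤ fuel →
    pvALoop stop_id cbc fuel queue focus = focus := by
  induction queue with
  | nil => intro fuel focus _ _; cases fuel <;> rfl
  | cons node queue ih =>
    intro fuel focus hq hle
    cases fuel with
    | zero => simp at hle
    | succ fuel =>
      have hn : node ∈ focus := hq node (by simp)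
      simp only [pvALoop, if_pos hn]
      exact ih fuel focus (fun x hx => hq x (by simp [hx])) (by simpa using hle)

-- every item of an updated dict comes from the old dict or from the pair list
theorem pvMem_items_update {κ ν : Type} [BEq κ] [LawfulBEq κ]
    (ps : List (κ × ν)) : ∀ (d : PySem.Dict κ ν) (p : κ × ν),
    p ∈ (d.update ps).items → p ∈ d.items ∨ p ∈ ps := by
  induction ps with
  | nil => intro d p h; exact Or.inl h
  | cons q ps ih =>
    intro d p h
    simp only [PySem.Dict.update, List.foldl_cons] at h
    rcases ih (d.insert q.1 q.2) p h with h | h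
    · rcases (PySem.Dict.mem_items_insert d q.1 q.2 p).mp h with h | h
      · exact Or.inr (by simp [h])
      · exact Or.inl h.1
    · exact Or.inr (by simp [h])

theorem pvGetD_length_le (l : List (String × List (List (String × String)))) (k : String) :
    ((PySem.Dict.ofList l).getD k []).length ≤ l.foldl (fun n kv => n + kv.2.length) 0 := by
  have hsum : ∀ (m : List (String × List (List (String × String)))) (a : Nat),
      m.foldl (fun n kv => n + kv.2.length) a = a + (m.map (fun kv => kv.2.length)).sum := by
    intro m
    induction m with
    | nil => intro a; simp
    | cons kv m ih => intro a; simp [ih]; omega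
  cases hv : (PySem.Dict.ofList l).get? k with
  | none => simp [PySem.Dict.getD, hv]
  | some v =>
    have hmem : (k, v) ∈ (PySem.Dict.ofList l).items :=
      PySem.Dict.mem_items_of_get?_eq_some _ hv
    have hl : (k, v) ∈ l := by
      rcases pvMem_items_update l PySem.Dict.empty (k, v) hmem with h | h
      · simp [PySem.Dict.empty] at h
      · exact h
    have : v.length ≤ (l.map (fun kv => kv.2.length)).sum :=
      List.single_le_sum (fun x _ => Nat.zero_le x) _ (List.mem_map_of_mem hl)
    simpa [PySem.Dict.getD, hv, hsum l 0] using this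

-- ===== VERDICT (by name: the statement is the Claim_ definition above) =====
theorem collect_focus_nodes_py_spec : Claim_equal_collect_focus_nodes_py := by
  intro start_id stop_id creates_by_child _ _
  unfold Spec_collect_focus_nodes_py collect_focus_nodes_py collect_focus_nodes_py_alt
  set cbc := PySem.Dict.ofList creates_by_child with hcbc
  set rels := cbc.getD start_id [] with hrels
  have hstart : start_id ∉ PySem.Set.empty := by simp [PySem.Set.empty]
  simp only [pvALoop]
  rw [if_neg hstart]
  have hinv := pvAStep_fold_inv stop_id rels
      (PySem.Set.add PySem.Set.empty start_id, []) (by simp)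
  obtain ⟨h1, h2, h3⟩ := hinv
  rw [pvALoop_drain stop_id cbc _ _ _ h2
      (le_trans (by simpa using h3) (pvGetD_length_le creates_by_child start_id))]
  rw [h1]
  rfl
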